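-- pv_equiv track=rewrite | github.com/eisbear2020/rule_switching | select_data.py | sel_trials
-- ===== SOURCE A (Python) =====
-- def sel_trials(timestamps, trial_sel):
--     # returns trial IDs of trials that meet the conditions in trial_sel
--     rule_identifier = []
--     trial_intervals = []
--     trial_new_rule = 0
--     temp = 0
--     # go through all trials:
--     for trial_ID, trial in enumerate(timestamps):
--         # check if trial agrees with conditions
--         # start,centrebegin, centreend, goalbegin, goalend, startarm, goalarm, control, lightarm, ruletype, errortrial
--         if trial[9] in trial_sel["ruletype"] and trial[10] in trial_sel["errortrial"] and \
--         trial[5] in trial_sel["startarm"] and trial[6] in trial_sel["goalarm"]: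
--             trial_intervals.append(trial_ID)
--             # remember number of trials saved to identify rule switch case
--             temp += 1
--             # check if new rule --> if yes, append to rule identifier
--             if not rule_identifier:
--                 rule_identifier.append(trial[9])
--             elif trial[9] != rule_identifier[-1]:
--                 rule_identifier.append(trial[9])
--                 trial_new_rule = temp
--     return trial_intervals, rule_identifier, trial_new_rule
-- ===== SOURCE B (Python) =====
-- def sel_trials(timestamps, trial_sel):
--     # filter first, then collapse consecutive equal ruletypes into groups
--     ruletypes = trial_sel.get("ruletype", [])
--     errortrials = trial_sel.get("errortrial", [])
--     startarms = trial_sel.get("startarm", [])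
--     goalarms = trial_sel.get("goalarm", [])
--     sel = [(i, t[9]) for i, t in enumerate(timestamps)
--            if t[9] in ruletypes and t[10] in errortrials
--            and t[5] in startarms and t[6] in goalarms]
--     trial_intervals = [i for i, _ in sel]
--     groups = []
--     for _, r in sel:
--         if groups and groups[-1][0] == r:
--             groups[-1] = (r, groups[-1][1] + 1)
--         else:
--             groups.append((r, 1))
--     rule_identifier = [k for k, _ in groups]
--     if len(groups) <= 1:
--         trial_new_rule = 0
--     else:
--         trial_new_rule = 1 + sum(n for _, n in groups[:-1])
--     return trial_intervals, rule_identifier, trial_new_rule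
-- ===== Notes on version B (the rewrite author's own statement) =====
-- stated objective: alternative
-- what changed: B separates concerns: one comprehension builds the filtered (id, ruletype) selection, then consecutive equal ruletypes are collapsed into run-length groups, from which rule_identifier is the group keys and trial_new_rule is 1 plus the sizes of all groups but the last (0 for at most one group), replacing A's single stateful loop with temp/last-element bookkeeping.
import Mathlib
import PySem

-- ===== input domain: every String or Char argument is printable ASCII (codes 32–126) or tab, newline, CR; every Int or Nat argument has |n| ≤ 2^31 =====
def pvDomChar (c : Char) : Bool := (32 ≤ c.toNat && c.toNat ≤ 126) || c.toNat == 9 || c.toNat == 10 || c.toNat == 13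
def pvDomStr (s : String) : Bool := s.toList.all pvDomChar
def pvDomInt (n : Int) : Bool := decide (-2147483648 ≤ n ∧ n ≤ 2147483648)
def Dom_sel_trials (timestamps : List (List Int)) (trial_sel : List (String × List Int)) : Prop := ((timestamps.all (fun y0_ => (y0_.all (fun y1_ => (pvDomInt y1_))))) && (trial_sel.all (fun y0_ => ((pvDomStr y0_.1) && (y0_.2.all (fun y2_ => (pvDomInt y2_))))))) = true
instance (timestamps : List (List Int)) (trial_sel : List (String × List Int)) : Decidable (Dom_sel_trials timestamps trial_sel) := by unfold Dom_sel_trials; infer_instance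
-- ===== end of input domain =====

-- B builds the filtered selection first, then collapses consecutive equal ruletypes into
-- run-length groups and derives rule_identifier and trial_new_rule from the groups
-- (alternative decomposition; same asymptotic cost).

-- ===== PORT A =====
-- step of A's loop over enumerate(timestamps), state = (trial_intervals, rule_identifier, trial_new_rule, temp)
def sel_trials (timestamps : List (List Int)) (trial_sel : List (String × List Int)) : List Int × List Int × Int :=
  let d : PySem.Dict String (List Int) := PySem.Dict.mk trial_sel
  let st := (PySem.List.enumerate timestamps).foldl
    (fun (s : List Int × List Int × Int × Int) (p : Int × List Int) =>
      if (PySem.List.pyGetD p.2 9 0) ∈ (d.getD "ruletype" []) ∧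
         (PySem.List.pyGetD p.2 10 0) ∈ (d.getD "errortrial" []) ∧
         (PySem.List.pyGetD p.2 5 0) ∈ (d.getD "startarm" []) ∧
         (PySem.List.pyGetD p.2 6 0) ∈ (d.getD "goalarm" []) then
        if s.2.1 = [] then
          (s.1 ++ [p.1], s.2.1 ++ [PySem.List.pyGetD p.2 9 0], s.2.2.1, s.2.2.2 + 1)
        else if PySem.List.pyGetD p.2 9 0 ≠ s.2.1.getLast?.getD 0 then
          (s.1 ++ [p.1], s.2.1 ++ [PySem.List.pyGetD p.2 9 0], s.2.2.2 + 1, s.2.2.2 + 1)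
        else
          (s.1 ++ [p.1], s.2.1, s.2.2.1, s.2.2.2 + 1)
      else s)
    ([], [], 0, 0)
  (st.1, st.2.1, st.2.2.1)

-- ===== PORT B =====
-- run-length grouping of consecutive equal values (B's hand-written loop over sel)
def pvGroups (rules : List Int) : List (Int × Int) :=
  rules.foldl (fun gs r =>
    match gs.getLast? with
    | some (k, n) => if k = r then gs.dropLast ++ [(r, n + 1)] else gs ++ [(r, 1)]
    | none => gs ++ [(r, 1)]) []

def sel_trials_alt (timestamps : List (List Int)) (trial_sel : List (String × List Int)) : List Int × List Int × Int :=
  let d : PySem.Dict String (List Int) := PySem.Dict.mk trial_sel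
  let ruletypes := d.getD "ruletype" []
  let errortrials := d.getD "errortrial" []
  let startarms := d.getD "startarm" []
  let goalarms := d.getD "goalarm" []
  let sel := ((PySem.List.enumerate timestamps).filter (fun p =>
      decide ((PySem.List.pyGetD p.2 9 0) ∈ ruletypes ∧ (PySem.List.pyGetD p.2 10 0) ∈ errortrials ∧
              (PySem.List.pyGetD p.2 5 0) ∈ startarms ∧ (PySem.List.pyGetD p.2 6 0) ∈ goalarms))).map
      (fun p => (p.1, PySem.List.pyGetD p.2 9 0))
  let groups := pvGroups (sel.map (·.2))
  let trial_new_rule : Int := if groups.length ≤ 1 then 0 else 1 + ((groups.dropLast.map (·.2)).sum)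
  (sel.map (·.1), groups.map (·.1), trial_new_rule)

-- ===== PRECONDITION & SPEC =====
-- Pre_ mirrors Python A's lazy evaluation exactly: every trial must have the indices A actually
-- touches (index 9 always, index 10 only for trials whose ruletype matches) and each of the four
-- keys must be present in trial_sel as soon as some trial's earlier `and`-conjuncts reach its
-- lookup; outside Pre_ A raises IndexError/KeyError.
def Pre_sel_trials (timestamps : List (List Int)) (trial_sel : List (String × List Int)) : Prop :=
  (∀ t ∈ timestamps, 10 ≤ t.length) ∧
  (timestamps ≠ [] → (PySem.Dict.mk trial_sel).contains "ruletype" = true) ∧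
  (∀ t ∈ timestamps, PySem.List.pyGetD t 9 0 ∈ (PySem.Dict.mk trial_sel).getD "ruletype" [] →
      11 ≤ t.length ∧ (PySem.Dict.mk trial_sel).contains "errortrial" = true) ∧
  (∀ t ∈ timestamps, PySem.List.pyGetD t 9 0 ∈ (PySem.Dict.mk trial_sel).getD "ruletype" [] →
      PySem.List.pyGetD t 10 0 ∈ (PySem.Dict.mk trial_sel).getD "errortrial" [] →
      (PySem.Dict.mk trial_sel).contains "startarm" = true) ∧
  (∀ t ∈ timestamps, PySem.List.pyGetD t 9 0 ∈ (PySem.Dict.mk trial_sel).getD "ruletype" [] →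
      PySem.List.pyGetD t 10 0 ∈ (PySem.Dict.mk trial_sel).getD "errortrial" [] →
      PySem.List.pyGetD t 5 0 ∈ (PySem.Dict.mk trial_sel).getD "startarm" [] →
      (PySem.Dict.mk trial_sel).contains "goalarm" = true)
instance (timestamps : List (List Int)) (trial_sel : List (String × List Int)) : Decidable (Pre_sel_trials timestamps trial_sel) := by unfold Pre_sel_trials; infer_instance

def pvWitness_sel_trials : List (List Int) × (List (String × List Int)) :=
  ([[0,0,0,0,0,1,2,0,0,3,0]], [("ruletype",[3]),("errortrial",[0]),("startarm",[1]),("goalarm",[2])])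

def Spec_sel_trials (timestamps : List (List Int)) (trial_sel : List (String × List Int)) (out : List Int × List Int × Int) : Prop := out = sel_trials_alt timestamps trial_sel
instance (timestamps : List (List Int)) (trial_sel : List (String × List Int)) (out : List Int × List Int × Int) : Decidable (Spec_sel_trials timestamps trial_sel out) := by unfold Spec_sel_trials; infer_instance

-- ===== CLAIM (what is proved, stated in full; the proofs are below) =====
def Claim_equal_sel_trials : Prop := ∀ (timestamps : List (List Int)) (trial_sel : List (String × List Int)), Dom_sel_trials timestamps trial_sel → Pre_sel_trials timestamps trial_sel → Spec_sel_trials timestamps trial_sel (sel_trials timestamps trial_sel)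

-- ===== LEMMAS AND PROOFS =====

-- the rule-identifier/new-rule/temp part of A's loop step, acting on the selected rule only
def pvSpecStep (s : List Int × Int × Int) (r : Int) : List Int × Int × Int :=
  if s.1 = [] then (s.1 ++ [r], s.2.1, s.2.2 + 1)
  else if r ≠ s.1.getLast?.getD 0 then (s.1 ++ [r], s.2.2 + 1, s.2.2 + 1)
  else (s.1, s.2.1, s.2.2 + 1)

-- A's fold splits into the interval accumulation and a fold of pvSpecStep over the selected rules
lemma pvFoldA (c : Int × List Int → Prop) [DecidablePred c] (f : Int × List Int → Int)
    (l : List (Int × List Int)) (Iv Rs : List Int) (nr tm : Int) :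
    l.foldl (fun (s : List Int × List Int × Int × Int) (p : Int × List Int) =>
        if c p then
          if s.2.1 = [] then
            (s.1 ++ [p.1], s.2.1 ++ [f p], s.2.2.1, s.2.2.2 + 1)
          else if f p ≠ s.2.1.getLast?.getD 0 then
            (s.1 ++ [p.1], s.2.1 ++ [f p], s.2.2.2 + 1, s.2.2.2 + 1)
          else
            (s.1 ++ [p.1], s.2.1, s.2.2.1, s.2.2.2 + 1)
        else s) (Iv, Rs, nr, tm)
    = (Iv ++ ((l.filter (fun p => decide (c p))).map (·.1)),
       ((l.filter (fun p => decide (c p))).map f).foldl pvSpecStep (Rs, nr, tm)) := by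
  induction l generalizing Iv Rs nr tm with
  | nil => simp
  | cons p l ih =>
    by_cases hc : c p
    · by_cases h1 : Rs = []
      · rw [List.foldl_cons, if_pos hc, if_pos h1, ih]
        simp [hc, h1, pvSpecStep]
      · by_cases h2 : f p ≠ Rs.getLast?.getD 0
        · rw [List.foldl_cons, if_pos hc, if_neg h1, if_pos h2, ih]
          simp [hc, h1, h2, pvSpecStep]
        · rw [List.foldl_cons, if_pos hc, if_neg h1, if_neg h2, ih]
          simp [hc, h1, h2, pvSpecStep]
    · rw [List.foldl_cons, if_neg hc, ih]
      simp [hc]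

lemma pvGroups_append (rs : List Int) (r : Int) :
    pvGroups (rs ++ [r]) =
      match (pvGroups rs).getLast? with
      | some (k, n) => if k = r then (pvGroups rs).dropLast ++ [(r, n + 1)] else pvGroups rs ++ [(r, 1)]
      | none => pvGroups rs ++ [(r, 1)] := by
  simp [pvGroups, List.foldl_append]

lemma pvGroups_append_nil (rs : List Int) (r : Int) (h : pvGroups rs = []) :
    pvGroups (rs ++ [r]) = [(r, 1)] := by
  rw [pvGroups_append, h]; simp

lemma pvGroups_append_some (rs : List Int) (r k n : Int) (gs : List (Int × Int))
    (h : pvGroups rs = gs ++ [(k, n)]) :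
    pvGroups (rs ++ [r]) = if k = r then gs ++ [(r, n + 1)] else (gs ++ [(k, n)]) ++ [(r, 1)] := by
  rw [pvGroups_append, h, List.getLast?_concat]
  simp

lemma pvGroups_ne_nil (rs : List Int) (h : rs ≠ []) : pvGroups rs ≠ [] := by
  induction rs using List.reverseRecOn with
  | nil => exact absurd rfl h
  | append_singleton rs r _ =>
    rcases hg : (pvGroups rs).getLast? with _ | ⟨k, n⟩
    · rw [pvGroups_append_nil rs r (List.getLast?_eq_none_iff.mp hg)]; simp
    · obtain ⟨gs, hgs⟩ := List.getLast?_eq_some_iff.mp hg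
      rw [pvGroups_append_some rs r k n gs hgs]
      split_ifs <;> simp

lemma pvGroups_sum (rs : List Int) : ((pvGroups rs).map (·.2)).sum = (rs.length : Int) := by
  induction rs using List.reverseRecOn with
  | nil => simp [pvGroups]
  | append_singleton rs r ih =>
    rcases hg : (pvGroups rs).getLast? with _ | ⟨k, n⟩
    · have h0 : pvGroups rs = [] := List.getLast?_eq_none_iff.mp hg
      have hrs : rs = [] := by
        by_contra hne; exact pvGroups_ne_nil rs hne h0
      rw [pvGroups_append_nil rs r h0, hrs]; simp
    · obtain ⟨gs, hgs⟩ := List.getLast?_eq_some_iff.mp hg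
      rw [pvGroups_append_some rs r k n gs hgs]
      rw [hgs] at ih
      simp only [List.map_append, List.sum_append, List.map_cons, List.map_nil, List.sum_cons,
        List.sum_nil, List.length_append, List.length_cons, List.length_nil] at ih ⊢
      split_ifs <;>
        · simp only [List.map_append, List.sum_append, List.map_cons, List.map_nil,
            List.sum_cons, List.sum_nil]
          push_cast at ih ⊢
          omega

lemma pvSpecB (rs : List Int) :
    rs.foldl pvSpecStep ([], 0, 0) =
      ((pvGroups rs).map (·.1),
       (if (pvGroups rs).length ≤ 1 then 0 else 1 + (((pvGroups rs).dropLast.map (·.2)).sum),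
       (rs.length : Int))) := by
  induction rs using List.reverseRecOn with
  | nil => simp [pvGroups]
  | append_singleton rs r ih =>
    rw [List.foldl_append, ih]
    simp only [List.foldl_cons, List.foldl_nil]
    rcases hg : (pvGroups rs).getLast? with _ | ⟨k, n⟩
    · have h0 : pvGroups rs = [] := List.getLast?_eq_none_iff.mp hg
      have hrs : rs = [] := by
        by_contra hne; exact pvGroups_ne_nil rs hne h0
      rw [pvGroups_append_nil rs r h0, h0, hrs]
      simp [pvSpecStep]
    · obtain ⟨gs, hgs⟩ := List.getLast?_eq_some_iff.mp hg
      have hsum : ((gs ++ [(k, n)]).map (·.2)).sum = (rs.length : Int) := by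
        have := pvGroups_sum rs; rwa [hgs] at this
      rw [pvGroups_append_some rs r k n gs hgs, hgs]
      by_cases hk : k = r
      · subst hk
        rw [if_pos rfl]
        simp [pvSpecStep]
      · have hkr : r ≠ k := fun h => hk h.symm
        rw [if_neg hk]
        simp [pvSpecStep, hkr]
        simp only [List.map_append, List.sum_append, List.map_cons, List.map_nil,
          List.sum_cons, List.sum_nil] at hsum ⊢
        omega

theorem sel_trials_spec : Claim_equal_sel_trials := by
  intro timestamps trial_sel _ _
  unfold Spec_sel_trials
  simp only [sel_trials, sel_trials_alt]
  rw [pvFoldA]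
  set l := (PySem.List.enumerate timestamps).filter _ with hl
  rw [pvSpecB]
  simp [List.map_map, Function.comp_def]
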